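-- pv_equiv track=rewrite | github.com/MerleLK/python-demo-small | review_problem/nets/2018/sequense_operate.py | solution
-- ===== SOURCE A (Python) =====
-- def solution(n, array):
--     b = []
--     for i in array:
--         b.append(i)
--         b.reverse()
--     result = ""
--     for i in b:
--         result += str(i) + " "
--     return result.strip()
-- ===== SOURCE B (Python) =====
-- def solution(n, array):
--     # One pass: elements whose index has the same parity as the last index end up
--     # in front (in reverse order), the rest keep their order behind.
--     front, back = [], []
--     take_front = len(array) % 2 == 1
--     for x in array:
--         if take_front:
--             front.append(x)
--         else:
--             back.append(x)
--         take_front = not take_front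
--     front.reverse()
--     return " ".join(str(x) for x in front + back)
-- ===== Notes on version B (the rewrite author's own statement) =====
-- stated objective: faster
-- what changed: Replaces the append-then-reverse simulation (a full list reversal per element) and quadratic string concatenation with a single pass that routes each element into a front or back bucket by alternating parity, one final reverse of the front bucket, and a join.
import Mathlib
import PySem

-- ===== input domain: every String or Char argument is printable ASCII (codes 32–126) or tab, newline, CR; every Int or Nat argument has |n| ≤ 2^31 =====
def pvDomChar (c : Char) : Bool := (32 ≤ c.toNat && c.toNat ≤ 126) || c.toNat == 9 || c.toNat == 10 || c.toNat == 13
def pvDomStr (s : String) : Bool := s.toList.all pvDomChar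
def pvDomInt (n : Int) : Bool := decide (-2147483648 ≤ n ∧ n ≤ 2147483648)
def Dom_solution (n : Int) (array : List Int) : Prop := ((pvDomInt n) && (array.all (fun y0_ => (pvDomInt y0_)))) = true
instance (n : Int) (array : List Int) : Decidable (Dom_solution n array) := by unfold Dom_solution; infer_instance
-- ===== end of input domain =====

-- B replaces A's per-element list reversal and quadratic string concatenation by a
-- single parity-alternating partition pass, one final reverse, and a join (faster).

-- ===== PORT A =====
-- for i in array: b.append(i); b.reverse()
def solution_loopA (array : List Int) : List Int :=
  array.foldl (fun b i => (b ++ [i]).reverse) []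

-- result string is built as a List Char (PySem.Chars is the exact model of Python str)
def solution (n : Int) (array : List Int) : String :=
  String.ofList (PySem.Chars.strip
    ((solution_loopA array).foldl (fun r i => r ++ PySem.Int.toChars i ++ [' ']) ([] : List Char)))

-- ===== PORT B =====
-- state = (front, back, take_front); each element goes into one bucket, flag flips
def solution_stepB (s : List Int × List Int × Bool) (x : Int) : List Int × List Int × Bool :=
  if s.2.2 then (s.1 ++ [x], s.2.1, false) else (s.1, s.2.1 ++ [x], true)

def solution_alt (n : Int) (array : List Int) : String :=
  let s := array.foldl solution_stepB ([], [], decide (array.length % 2 = 1))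
  String.ofList (PySem.Chars.join [' '] ((s.1.reverse ++ s.2.1).map PySem.Int.toChars))

-- ===== PRECONDITION & SPEC =====
def Spec_solution (n : Int) (array : List Int) (out : String) : Prop := out = solution_alt n array
instance (n : Int) (array : List Int) (out : String) : Decidable (Spec_solution n array out) := by unfold Spec_solution; infer_instance

-- ===== CLAIM (what is proved, stated in full; the proofs are below) =====
def Claim_equal_solution : Prop := ∀ (n : Int) (array : List Int), Dom_solution n array → Spec_solution n array (solution n array)

-- ===== LEMMAS AND PROOFS =====

-- flipping B's flag swaps the two buckets throughout the fold
theorem solution_swap (xs : List Int) : ∀ (fr bk : List Int) (fl : Bool),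
    xs.foldl solution_stepB (bk, fr, !fl) =
      ((xs.foldl solution_stepB (fr, bk, fl)).2.1,
       (xs.foldl solution_stepB (fr, bk, fl)).1,
       !(xs.foldl solution_stepB (fr, bk, fl)).2.2) := by
  induction xs with
  | nil => intro fr bk fl; simp
  | cons x xs ih =>
    intro fr bk fl
    cases fl
    · simpa [solution_stepB] using ih fr (bk ++ [x]) true
    · simpa [solution_stepB] using ih (fr ++ [x]) bk false

-- the flag after the fold is the initial flag xor the parity of the length
theorem solution_flag (xs : List Int) : ∀ (fr bk : List Int) (fl : Bool),
    (xs.foldl solution_stepB (fr, bk, fl)).2.2 = (fl != decide (xs.length % 2 = 1)) := by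
  induction xs with
  | nil => intro fr bk fl; cases fl <;> simp
  | cons x xs ih =>
    intro fr bk fl
    cases fl <;>
      simp [solution_stepB, ih] <;>
      rcases Nat.mod_two_eq_zero_or_one xs.length with h | h <;>
      simp [Nat.succ_mod_two_eq_one_iff, h]

-- A's simulated list equals B's front-reversed ++ back
theorem solution_lists (xs : List Int) :
    solution_loopA xs =
      (xs.foldl solution_stepB ([], [], decide (xs.length % 2 = 1))).1.reverse ++
      (xs.foldl solution_stepB ([], [], decide (xs.length % 2 = 1))).2.1 := by
  induction xs using List.reverseRecOn with
  | nil => simp [solution_loopA]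
  | append_singleton xs x ih =>
    have hflip : decide ((xs ++ [x]).length % 2 = 1) = !decide (xs.length % 2 = 1) := by
      rcases Nat.mod_two_eq_zero_or_one xs.length with h | h <;>
        simp [Nat.succ_mod_two_eq_one_iff, h]
    have hA : solution_loopA (xs ++ [x]) = x :: (solution_loopA xs).reverse := by
      simp [solution_loopA, List.foldl_append]
    have hswap := solution_swap xs [] [] (decide (xs.length % 2 = 1))
    have hflag := solution_flag xs ([] : List Int) ([] : List Int) (decide (xs.length % 2 = 1))
    have hB : (xs ++ [x]).foldl solution_stepB ([], [], decide ((xs ++ [x]).length % 2 = 1)) =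
        ((xs.foldl solution_stepB ([], [], decide (xs.length % 2 = 1))).2.1 ++ [x],
         (xs.foldl solution_stepB ([], [], decide (xs.length % 2 = 1))).1, false) := by
      rw [hflip, List.foldl_append, hswap]
      simp [solution_stepB, hflag]
    rw [hA, hB, ih]
    simp

-- every char str(n) produces is a non-space char ('-' or a digit char)
theorem solution_digitChar_not_space (m : Nat) (h : m < 10) :
    PySem.Chars.isspace (Nat.digitChar m) = false := by
  interval_cases m <;> rfl

theorem solution_toDigitsCore_not_space :
    ∀ (f n : Nat) (ds : List Char), (∀ c ∈ ds, PySem.Chars.isspace c = false) →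
      ∀ c ∈ Nat.toDigitsCore 10 f n ds, PySem.Chars.isspace c = false := by
  intro f
  induction f with
  | zero => intro n ds h; simpa [Nat.toDigitsCore] using h
  | succ f ih =>
    intro n ds h c hc
    simp only [Nat.toDigitsCore] at hc
    split at hc
    · rcases List.mem_cons.mp hc with h1 | h1
      · rw [h1]; exact solution_digitChar_not_space _ (Nat.mod_lt _ (by norm_num))
      · exact h _ h1
    · refine ih _ _ ?_ _ hc
      intro d hd
      rcases List.mem_cons.mp hd with h1 | h1
      · rw [h1]; exact solution_digitChar_not_space _ (Nat.mod_lt _ (by norm_num))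
      · exact h _ h1

theorem solution_toDigitsCore_ne_nil (b : Nat) :
    ∀ (f n : Nat) (ds : List Char), f ≠ 0 ∨ ds ≠ [] → Nat.toDigitsCore b f n ds ≠ [] := by
  intro f
  induction f with
  | zero =>
    intro n ds h
    simp only [Nat.toDigitsCore]
    tauto
  | succ f ih =>
    intro n ds _
    simp only [Nat.toDigitsCore]
    split
    · simp
    · exact ih _ _ (Or.inr (by simp))

theorem solution_toChars_not_space (i : Int) :
    ∀ c ∈ PySem.Int.toChars i, PySem.Chars.isspace c = false := by
  unfold PySem.Int.toChars Nat.toDigits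
  split <;> intro c hc
  · rcases List.mem_cons.mp hc with h1 | h1
    · rw [h1]; rfl
    · exact solution_toDigitsCore_not_space _ _ [] (by simp) c h1
  · exact solution_toDigitsCore_not_space _ _ [] (by simp) c hc

theorem solution_toChars_ne_nil (i : Int) : PySem.Int.toChars i ≠ [] := by
  unfold PySem.Int.toChars Nat.toDigits
  split
  · simp
  · exact solution_toDigitsCore_ne_nil 10 _ _ [] (Or.inl (by simp))

-- joining nonempty non-space pieces yields a string ending in a non-space char
theorem solution_join_concat (ss : List (List Char)) :
    ∀ s₀ : List Char, s₀ ≠ [] → (∀ s ∈ s₀ :: ss, s ≠ [] ∧ ∀ c ∈ s, PySem.Chars.isspace c = false) →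
      ∃ u c, PySem.Chars.join [' '] (s₀ :: ss) = u ++ [c] ∧ PySem.Chars.isspace c = false := by
  induction ss with
  | nil =>
    intro s₀ hne h
    rcases List.eq_nil_or_concat s₀ with rfl | ⟨u, c, rfl⟩
    · exact absurd rfl hne
    · refine ⟨u, c, ?_, (h (u.concat c) (by simp)).2 c (by simp)⟩
      rw [PySem.Chars.join_singleton]
      simp
  | cons s₁ ss ih =>
    intro s₀ hne h
    obtain ⟨u, c, hjoin, hc⟩ := ih s₁ (h s₁ (by simp)).1
      (fun s hs => h s (by
        rcases List.mem_cons.mp hs with h1 | h1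
        · rw [h1]; simp
        · simp [h1]))
    refine ⟨s₀ ++ ' ' :: u, c, ?_, hc⟩
    rw [PySem.Chars.join_cons_cons, hjoin]
    simp

-- strip of A's "piece ++ space" concatenation is the join of the pieces
theorem solution_strip_flat (ss : List (List Char))
    (h : ∀ s ∈ ss, s ≠ [] ∧ ∀ c ∈ s, PySem.Chars.isspace c = false) :
    PySem.Chars.strip (ss.flatMap (fun s => s ++ [' '])) = PySem.Chars.join [' '] ss := by
  cases ss with
  | nil => rfl
  | cons s₀ ss =>
    -- the flattened chain is (join of pieces) ++ [' ']
    have hflat : ∀ (t : List (List Char)) (t₀ : List Char),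
        (t₀ :: t).flatMap (fun s => s ++ [' ']) = PySem.Chars.join [' '] (t₀ :: t) ++ [' '] := by
      intro t
      induction t with
      | nil => intro t₀; rw [PySem.Chars.join_singleton]; simp
      | cons s₁ t iht =>
        intro t₀
        rw [PySem.Chars.join_cons_cons]
        simp only [List.flatMap_cons] at *
        rw [iht s₁]
        simp
    rw [hflat]
    obtain ⟨hne, hns⟩ := h s₀ (by simp)
    obtain ⟨u, c, hjoin, hc⟩ := solution_join_concat ss s₀ hne h
    -- the first char of the join is s₀'s first char, non-space: lstrip is the identity
    rcases s₀ with _ | ⟨c₀, s₀'⟩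
    · exact absurd rfl hne
    have hc₀ : PySem.Chars.isspace c₀ = false := hns c₀ (by simp)
    have hhead : ∃ v, PySem.Chars.join [' '] ((c₀ :: s₀') :: ss) = c₀ :: v := by
      cases ss with
      | nil => exact ⟨s₀', by rw [PySem.Chars.join_singleton]⟩
      | cons s₁ t => exact ⟨s₀' ++ ' ' :: PySem.Chars.join [' '] (s₁ :: t),
          by rw [PySem.Chars.join_cons_cons]; simp⟩
    obtain ⟨v, hv⟩ := hhead
    have hsp : PySem.Chars.isspace ' ' = true := rfl
    have hl : PySem.Chars.lstrip (PySem.Chars.join [' '] ((c₀ :: s₀') :: ss) ++ [' ']) =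
        PySem.Chars.join [' '] ((c₀ :: s₀') :: ss) ++ [' '] := by
      rw [hv]
      simp [PySem.Chars.lstrip, hc₀]
    have hr : PySem.Chars.rstrip (PySem.Chars.join [' '] ((c₀ :: s₀') :: ss) ++ [' ']) =
        PySem.Chars.join [' '] ((c₀ :: s₀') :: ss) := by
      rw [hjoin]
      simp [PySem.Chars.rstrip, hsp, hc]
    unfold PySem.Chars.strip
    rw [hl, hr]

-- ===== VERDICT (by name: the statement is the Claim_ definition above) =====
theorem solution_spec : Claim_equal_solution := by
  intro n array _
  unfold Spec_solution solution solution_alt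
  have hps : ∀ s ∈ ((solution_loopA array).map PySem.Int.toChars),
      s ≠ [] ∧ ∀ c ∈ s, PySem.Chars.isspace c = false := by
    intro s hs
    simp only [List.mem_map] at hs
    obtain ⟨i, _, rfl⟩ := hs
    exact ⟨solution_toChars_ne_nil i, solution_toChars_not_space i⟩
  have hkey := solution_strip_flat ((solution_loopA array).map PySem.Int.toChars) hps
  rw [List.flatMap_map] at hkey
  have hfold : (solution_loopA array).foldl
      (fun (r : List Char) i => r ++ PySem.Int.toChars i ++ [' ']) [] =
      (solution_loopA array).flatMap (fun i => PySem.Int.toChars i ++ [' ']) := by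
    rw [show (fun (r : List Char) i => r ++ PySem.Int.toChars i ++ [' ']) =
        (fun (r : List Char) i => r ++ (PySem.Int.toChars i ++ [' '])) from by
      funext r i; simp]
    exact PySem.List.foldl_append_eq_flatMap _ _ []
  rw [hfold, hkey, solution_lists]
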